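-- pv_equiv track=rewrite | github.com/rogdooley/MailTriage | mailtriage/core/extract.py | strip_structured_blocks
-- ===== SOURCE A (Python) =====
-- def strip_structured_blocks(text: str) -> tuple[str, bool]:
--     lines = text.split("\n")
--     structured = False
--     result: list[str] = []
--
--     in_block = True
--     for ln in lines:
--         if in_block and (ln.startswith(" ") or ":" in ln[:20]):
--             structured = True
--             continue
--         in_block = False
--         result.append(ln)
--
--     return "\n".join(result).strip(), structured
-- ===== SOURCE B (Python) =====
-- def strip_structured_blocks(text: str) -> tuple[str, bool]:
--     structured = False
--     while True:
--         parts = text.split("\n", 1)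
--         if not (parts[0].startswith(" ") or ":" in parts[0][:20]):
--             return text.strip(), structured
--         if len(parts) == 1:
--             return "", True
--         text = parts[1]
--         structured = True
-- ===== Notes on version B (the rewrite author's own statement) =====
-- stated objective: alternative
-- what changed: B never builds the list of lines: it repeatedly peels off just the first line with a maxsplit-1 split while that line is header-like, then strips the untouched remainder of the original string directly, so A's split-all / flag-filter loop / join pipeline disappears.
import Mathlib
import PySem

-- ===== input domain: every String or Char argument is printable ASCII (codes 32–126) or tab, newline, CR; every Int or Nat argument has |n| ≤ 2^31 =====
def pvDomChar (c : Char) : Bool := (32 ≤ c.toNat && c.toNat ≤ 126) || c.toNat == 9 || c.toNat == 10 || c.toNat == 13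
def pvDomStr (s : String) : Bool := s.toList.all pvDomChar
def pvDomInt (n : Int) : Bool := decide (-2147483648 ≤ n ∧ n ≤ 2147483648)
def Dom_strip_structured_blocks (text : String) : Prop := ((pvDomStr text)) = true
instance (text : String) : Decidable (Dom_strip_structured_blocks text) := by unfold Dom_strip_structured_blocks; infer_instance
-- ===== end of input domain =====

-- B peels one line at a time with split("\n",1) and strips the untouched remainder directly, instead of A's split-all / flag-filter / join pipeline (alternative decomposition; same result).


-- ===== PORT A =====
-- A's loop body: state = (structured, result, in_block); the header test is A's inline condition
def pvStepA (s : Bool × List (List Char) × Bool) (ln : List Char) : Bool × List (List Char) × Bool :=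
  if s.2.2 && (PySem.Chars.startswith ln [' '] || PySem.Chars.isIn [':'] (PySem.Chars.slice ln none (some 20))) then
    (true, s.2.1, s.2.2)
  else
    (s.1, s.2.1 ++ [ln], false)

def strip_structured_blocks (text : String) : String × Bool :=
  let lines := (PySem.Chars.split? text.toList ['\n']).getD []  -- sep "\n" ≠ "", so split? is some: exact
  let st := lines.foldl pvStepA (false, ([], true))
  (String.ofList (PySem.Chars.strip (PySem.Chars.join ['\n'] st.2.1)), st.1)

-- ===== PORT B =====
-- B: header-like first line (parts[0].startswith(" ") or ":" in parts[0][:20])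
def pvIsHeaderC (ln : List Char) : Bool :=
  PySem.Chars.startswith ln [' '] || PySem.Chars.isIn [':'] (PySem.Chars.slice ln none (some 20))

-- (termination support for B's loop: s.split("\n", 1) characterised; cited by pvAltGo's decreasing_by)
theorem pvGoMax0 (fuel : Nat) (l cur : List Char) (accs : List (List Char)) :
    PySem.Chars.splitOnMax.go ['\n'] fuel 0 l (cur) (accs) = ((cur.reverse ++ l) :: accs).reverse := by
  cases fuel with
  | zero => rw [PySem.Chars.splitOnMax.go]
  | succ n =>
    cases l with
    | nil => rw [PySem.Chars.splitOnMax.go] <;> simp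
    | cons c rest => rw [PySem.Chars.splitOnMax.go] <;> simp

theorem pvGoMax1 (l : List Char) (fuel : Nat) (cur : List Char) (acc : List (List Char))
    (h : l.length ≤ fuel) :
    PySem.Chars.splitOnMax.go ['\n'] fuel 1 l cur acc =
      acc.reverse ++ (if '\n' ∈ l then
        [cur.reverse ++ l.takeWhile (· ≠ '\n'), (l.dropWhile (· ≠ '\n')).tail]
      else [cur.reverse ++ l]) := by
  induction l generalizing fuel cur acc with
  | nil =>
    cases fuel with
    | zero => rw [PySem.Chars.splitOnMax.go]; simp
    | succ n => rw [PySem.Chars.splitOnMax.go] <;> simp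
  | cons c rest ih =>
    cases fuel with
    | zero => simp at h
    | succ n =>
      rw [PySem.Chars.splitOnMax.go]
      by_cases hc : c = '\n'
      · subst hc
        have hpre : (['\n'] : List Char).isPrefixOf ('\n' :: rest) = true := by
          simp [List.isPrefixOf]
        simp only [hpre, if_true, one_ne_zero, if_false]
        rw [pvGoMax0]
        simp [List.takeWhile, List.dropWhile]
      · have hpre : (['\n'] : List Char).isPrefixOf (c :: rest) = false := by
          simp [List.isPrefixOf]; exact fun h => absurd h.symm hc
        simp only [hpre, one_ne_zero, if_false, Bool.false_eq_true]
        rw [ih n (c :: cur) acc (by simpa using h)]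
        simp [hc, Ne.symm hc]

theorem pvSplitOnMax1_of_not_mem (cs : List Char) (h : '\n' ∉ cs) :
    PySem.Chars.splitOnMax cs ['\n'] 1 = [cs] := by
  unfold PySem.Chars.splitOnMax
  rw [if_neg (by omega), show ((1 : Int)).toNat = 1 from rfl]
  rw [pvGoMax1 cs (cs.length + 1) [] [] (by omega)]
  simp [h]

theorem pvSplitOnMax1_of_mem (cs : List Char) (h : '\n' ∈ cs) :
    PySem.Chars.splitOnMax cs ['\n'] 1 =
      [cs.takeWhile (· ≠ '\n'), (cs.dropWhile (· ≠ '\n')).tail] := by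
  unfold PySem.Chars.splitOnMax
  rw [if_neg (by omega), show ((1 : Int)).toNat = 1 from rfl]
  rw [pvGoMax1 cs (cs.length + 1) [] [] (by omega)]
  simp [h]

theorem pvDropWhile_eq (cs : List Char) (h : '\n' ∈ cs) :
    cs.dropWhile (· ≠ '\n') = '\n' :: (cs.dropWhile (· ≠ '\n')).tail := by
  induction cs with
  | nil => cases h
  | cons c rest ih =>
    by_cases hc : c = '\n'
    · subst hc; simp [List.dropWhile_cons]
    · have hm : '\n' ∈ rest := (List.mem_cons.mp h).resolve_left (fun he => hc he.symm)
      rw [List.dropWhile_cons, if_pos (by simpa using hc)]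
      exact ih hm

theorem pvDecomp (cs : List Char) (h : '\n' ∈ cs) :
    cs = cs.takeWhile (· ≠ '\n') ++ '\n' :: (cs.dropWhile (· ≠ '\n')).tail := by
  conv_lhs => rw [← List.takeWhile_append_dropWhile (p := fun c => decide (c ≠ '\n')) (l := cs),
    pvDropWhile_eq cs h]

theorem pvSplitOnMax1_tail_lt (cs p0 r : List Char) (rs : List (List Char))
    (h : PySem.Chars.splitOnMax cs ['\n'] 1 = p0 :: r :: rs) : r.length < cs.length := by
  by_cases hm : '\n' ∈ cs
  · rw [pvSplitOnMax1_of_mem cs hm] at h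
    have hr : r = (cs.dropWhile (· ≠ '\n')).tail := by
      injection h with h1 h2; injection h2 with h3 _; exact h3.symm
    have hlen : cs.length =
        (cs.takeWhile (· ≠ '\n')).length + ((cs.dropWhile (· ≠ '\n')).tail.length + 1) := by
      conv_lhs => rw [pvDecomp cs hm]
      simp
    rw [hr]; omega
  · rw [pvSplitOnMax1_of_not_mem cs hm] at h
    simp at h

-- B's while-loop: state = (text, structured); peel the first line while it is header-like
def pvAltGo (cs : List Char) (structured : Bool) : List Char × Bool :=
  match h : PySem.Chars.splitOnMax cs ['\n'] 1 with
  | [] => ([], true)  -- unreachable: split never returns an empty list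
  | p0 :: rest =>
    if pvIsHeaderC p0 then
      match h2 : rest with
      | [] => ([], true)
      | r :: _ => pvAltGo r true
    else
      (PySem.Chars.strip cs, structured)
termination_by cs.length
decreasing_by exact pvSplitOnMax1_tail_lt cs p0 r _ h

def strip_structured_blocks_alt (text : String) : String × Bool :=
  let r := pvAltGo text.toList false
  (String.ofList r.1, r.2)

-- ===== PRECONDITION & SPEC =====
def Spec_strip_structured_blocks (text : String) (out : String × Bool) : Prop := out = strip_structured_blocks_alt text
instance (text : String) (out : String × Bool) : Decidable (Spec_strip_structured_blocks text out) := by unfold Spec_strip_structured_blocks; infer_instance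

-- ===== CLAIM (what is proved, stated in full; the proofs are below) =====
def Claim_equal_strip_structured_blocks : Prop := ∀ (text : String), Dom_strip_structured_blocks text → Spec_strip_structured_blocks text (strip_structured_blocks text)

-- ===== LEMMAS AND PROOFS =====

-- the list of lines of cs (split on '\n'), as a structural recursion
def pvSplitNL : List Char → List (List Char)
  | [] => [[]]
  | c :: rest => if c = '\n' then [] :: pvSplitNL rest else List.modifyHead (c :: ·) (pvSplitNL rest)

theorem pvSplitNL_ne_nil (cs : List Char) : pvSplitNL cs ≠ [] := by
  induction cs with
  | nil => simp [pvSplitNL]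
  | cons c rest ih =>
    rw [pvSplitNL]
    split
    · simp
    · cases h : pvSplitNL rest with
      | nil => exact absurd h ih
      | cons a t => simp [List.modifyHead]

theorem pvGoN (l : List Char) (fuel : Nat) (cur : List Char) (acc : List (List Char))
    (h : l.length ≤ fuel) :
    PySem.Chars.splitOn.go ['\n'] fuel l cur acc =
      acc.reverse ++ (cur.reverse ++ (pvSplitNL l).headD []) :: (pvSplitNL l).tail := by
  induction l generalizing fuel cur acc with
  | nil =>
    cases fuel with
    | zero => rw [PySem.Chars.splitOn.go]; simp [pvSplitNL]
    | succ n => rw [PySem.Chars.splitOn.go] <;> simp [pvSplitNL]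
  | cons c rest ih =>
    cases fuel with
    | zero => simp at h
    | succ n =>
      rw [PySem.Chars.splitOn.go]
      by_cases hc : c = '\n'
      · subst hc
        have hpre : (['\n'] : List Char).isPrefixOf ('\n' :: rest) = true := by
          simp [List.isPrefixOf]
        simp only [hpre, if_true]
        rw [show List.drop (['\n'] : List Char).length ('\n' :: rest) = rest from rfl]
        rw [ih n [] (cur.reverse :: acc) (by simpa using h)]
        rw [pvSplitNL, if_pos rfl]
        cases hP : pvSplitNL rest with
        | nil => exact absurd hP (pvSplitNL_ne_nil rest)
        | cons a t => simp
      · have hpre : (['\n'] : List Char).isPrefixOf (c :: rest) = false := by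
          simp [List.isPrefixOf]; exact fun h => absurd h.symm hc
        simp only [hpre, Bool.false_eq_true, if_false]
        rw [ih n (c :: cur) acc (by simpa using h)]
        rw [pvSplitNL, if_neg hc]
        cases hP : pvSplitNL rest with
        | nil => exact absurd hP (pvSplitNL_ne_nil rest)
        | cons a t => simp [List.modifyHead]

theorem pvSplitOn_eq (cs : List Char) : PySem.Chars.splitOn cs ['\n'] = pvSplitNL cs := by
  unfold PySem.Chars.splitOn
  rw [pvGoN cs (cs.length + 1) [] [] (by omega)]
  cases hP : pvSplitNL cs with
  | nil => exact absurd hP (pvSplitNL_ne_nil cs)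
  | cons a t => simp

theorem pvSplitNL_append (t r : List Char) (h : '\n' ∉ t) :
    pvSplitNL (t ++ '\n' :: r) = t :: pvSplitNL r := by
  induction t with
  | nil => rw [List.nil_append, pvSplitNL, if_pos rfl]
  | cons c t' ih =>
    have hc : c ≠ '\n' := fun he => h (by simp [he])
    have hm : '\n' ∉ t' := fun hm => h (List.mem_cons_of_mem _ hm)
    rw [List.cons_append, pvSplitNL, if_neg hc, ih hm]
    simp [List.modifyHead]

theorem pvSplitNL_of_not_mem (cs : List Char) (h : '\n' ∉ cs) : pvSplitNL cs = [cs] := by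
  induction cs with
  | nil => rfl
  | cons c rest ih =>
    have hc : c ≠ '\n' := fun he => h (by simp [he])
    have hm : '\n' ∉ rest := fun hm => h (List.mem_cons_of_mem _ hm)
    rw [pvSplitNL, if_neg hc, ih hm]
    simp [List.modifyHead]

theorem pvJoin_pvSplitNL (cs : List Char) : PySem.Chars.join ['\n'] (pvSplitNL cs) = cs := by
  induction cs with
  | nil => rw [pvSplitNL, PySem.Chars.join_singleton]
  | cons c rest ih =>
    rw [pvSplitNL]
    by_cases hc : c = '\n'
    · rw [if_pos hc, hc]
      cases hP : pvSplitNL rest with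
      | nil => exact absurd hP (pvSplitNL_ne_nil rest)
      | cons a t =>
        rw [PySem.Chars.join_cons_cons]
        rw [hP] at ih
        rw [ih]
        rfl
    · rw [if_neg hc]
      cases hP : pvSplitNL rest with
      | nil => exact absurd hP (pvSplitNL_ne_nil rest)
      | cons a t =>
        rw [hP] at ih
        cases t with
        | nil =>
          rw [List.modifyHead, PySem.Chars.join_singleton]
          rw [PySem.Chars.join_singleton] at ih
          rw [ih]
        | cons b t' =>
          rw [List.modifyHead, PySem.Chars.join_cons_cons]
          rw [PySem.Chars.join_cons_cons] at ih
          rw [List.cons_append, List.cons_append, ih]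

-- drop the leading header-like lines (characterisation of both loops)
def pvDropHeaders : List (List Char) → List (List Char)
  | [] => []
  | ln :: rest => if pvIsHeaderC ln then pvDropHeaders rest else ln :: rest

theorem pvDropHeaders_length_le (l : List (List Char)) : (pvDropHeaders l).length ≤ l.length := by
  induction l with
  | nil => simp [pvDropHeaders]
  | cons ln rest ih =>
    rw [pvDropHeaders]
    split
    · exact Nat.le_trans ih (Nat.le_succ _)
    · simp

-- once in_block is false, A's loop only appends
theorem pvLoop_false (l : List (List Char)) (s : Bool) (r : List (List Char)) :
    l.foldl pvStepA (s, (r, false)) = (s, (r ++ l, false)) := by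
  induction l generalizing r with
  | nil => simp
  | cons ln rest ih =>
    rw [List.foldl_cons, show pvStepA (s, (r, false)) ln = (s, (r ++ [ln], false)) from by
      simp [pvStepA], ih]
    simp

-- while in_block is true, A's loop drops exactly the leading header lines
theorem pvLoop_true (l : List (List Char)) (s : Bool) (r : List (List Char)) :
    l.foldl pvStepA (s, (r, true)) =
      ((s || decide ((pvDropHeaders l).length < l.length)),
        (r ++ pvDropHeaders l, (pvDropHeaders l).isEmpty)) := by
  induction l generalizing s r with
  | nil => simp [pvDropHeaders]
  | cons ln rest ih =>
    rw [List.foldl_cons]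
    by_cases h : pvIsHeaderC ln
    · have h2 : (PySem.Chars.startswith ln [' '] || PySem.Chars.isIn [':'] (PySem.Chars.slice ln none (some 20))) = true := h
      rw [pvDropHeaders, if_pos h]
      rw [show pvStepA (s, (r, true)) ln = (true, (r, true)) from by
        dsimp only [pvStepA]
        rw [Bool.true_and, if_pos h2]]
      rw [ih]
      have hlt : (pvDropHeaders rest).length < rest.length + 1 :=
        Nat.lt_succ_of_le (pvDropHeaders_length_le rest)
      simp [hlt]
    · have h2 : ¬ ((PySem.Chars.startswith ln [' '] || PySem.Chars.isIn [':'] (PySem.Chars.slice ln none (some 20))) = true) := h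
      rw [pvDropHeaders, if_neg h]
      rw [show pvStepA (s, (r, true)) ln = (s, (r ++ [ln], false)) from by
        dsimp only [pvStepA]
        rw [Bool.true_and, if_neg h2]]
      rw [pvLoop_false]
      simp

-- B's loop computes A's value
theorem pvDropHeaders_cons_of_pos (x : List Char) (xs : List (List Char))
    (h : pvIsHeaderC x = true) : pvDropHeaders (x :: xs) = pvDropHeaders xs := by
  rw [pvDropHeaders, if_pos h]

theorem pvDropHeaders_cons_of_neg (x : List Char) (xs : List (List Char))
    (h : ¬ pvIsHeaderC x = true) : pvDropHeaders (x :: xs) = x :: xs := by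
  rw [pvDropHeaders, if_neg h]

-- unfolding equations for pvAltGo, one per branch
theorem pvAltGo_eq_nonheader (cs : List Char) (b : Bool) (p0 : List Char) (rest : List (List Char))
    (h : PySem.Chars.splitOnMax cs ['\n'] 1 = p0 :: rest) (hh : ¬ pvIsHeaderC p0 = true) :
    pvAltGo cs b = (PySem.Chars.strip cs, b) := by
  rw [pvAltGo.eq_def]
  split
  · next heq => exact absurd (h.symm.trans heq) (by simp)
  · next p0' rest' heq =>
    rw [h] at heq
    injection heq with e1 e2
    subst e1
    rw [if_neg hh]

theorem pvAltGo_eq_header_nil (cs : List Char) (b : Bool) (p0 : List Char)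
    (h : PySem.Chars.splitOnMax cs ['\n'] 1 = [p0]) (hh : pvIsHeaderC p0 = true) :
    pvAltGo cs b = ([], true) := by
  rw [pvAltGo.eq_def]
  split
  · next heq => exact absurd (h.symm.trans heq) (by simp)
  · next p0' rest' heq =>
    rw [h] at heq
    injection heq with e1 e2
    subst e1; subst e2
    rw [if_pos hh]

theorem pvAltGo_eq_header_cons (cs : List Char) (b : Bool) (p0 r : List Char)
    (tl : List (List Char))
    (h : PySem.Chars.splitOnMax cs ['\n'] 1 = p0 :: r :: tl) (hh : pvIsHeaderC p0 = true) :
    pvAltGo cs b = pvAltGo r true := by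
  rw [pvAltGo.eq_def]
  split
  · next heq => exact absurd (h.symm.trans heq) (by simp)
  · next p0' rest' heq =>
    rw [h] at heq
    injection heq with e1 e2
    subst e1; subst e2
    rw [if_pos hh]

theorem pvAltGo_spec (cs : List Char) (structured : Bool) :
    pvAltGo cs structured =
      (PySem.Chars.strip (PySem.Chars.join ['\n'] (pvDropHeaders (pvSplitNL cs))),
        structured || decide ((pvDropHeaders (pvSplitNL cs)).length < (pvSplitNL cs).length)) := by
  induction cs, structured using pvAltGo.induct with
  | case1 cs structured h =>
    exfalso
    by_cases hm : '\n' ∈ cs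
    · rw [pvSplitOnMax1_of_mem cs hm] at h; simp at h
    · rw [pvSplitOnMax1_of_not_mem cs hm] at h; simp at h
  | case2 cs structured p0 hh h _h2 =>
    have hm : '\n' ∉ cs := by
      intro hm
      rw [pvSplitOnMax1_of_mem cs hm] at h
      simp at h
    have hp0 : p0 = cs := by
      rw [pvSplitOnMax1_of_not_mem cs hm] at h
      injection h with h1 _; all_goals exact h1.symm
    subst hp0
    rw [pvAltGo_eq_header_nil p0 structured p0 h hh]
    rw [pvSplitNL_of_not_mem p0 hm, pvDropHeaders_cons_of_pos p0 [] hh]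
    simp [pvDropHeaders, PySem.Chars.join_nil,
      show PySem.Chars.strip ([] : List Char) = [] from rfl]
  | case3 cs structured p0 hh r tl h _h2 ih =>
    have hm : '\n' ∈ cs := by
      by_contra hm
      rw [pvSplitOnMax1_of_not_mem cs hm] at h
      simp at h
    have hspec := pvSplitOnMax1_of_mem cs hm
    rw [h] at hspec
    have hp0 : p0 = cs.takeWhile (· ≠ '\n') := by injection hspec with h1 _; all_goals exact h1
    have hr : r = (cs.dropWhile (· ≠ '\n')).tail := by
      injection hspec with _ h2'; all_goals injection h2' with h3 _; all_goals exact h3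
    have hnt : '\n' ∉ cs.takeWhile (· ≠ '\n') := by
      intro hmem
      have := List.mem_takeWhile_imp hmem
      simp at this
    have hPs : pvSplitNL cs = p0 :: pvSplitNL r := by
      conv_lhs => rw [pvDecomp cs hm]
      rw [← hr, ← hp0]
      exact pvSplitNL_append _ _ (hp0 ▸ hnt)
    rw [pvAltGo_eq_header_cons cs structured p0 r tl h hh, ih]
    rw [hPs, pvDropHeaders_cons_of_pos p0 _ hh]
    have hd2 : decide ((pvDropHeaders (pvSplitNL r)).length < (p0 :: pvSplitNL r).length) = true := by
      simp [List.length_cons, Nat.lt_succ_of_le (pvDropHeaders_length_le (pvSplitNL r))]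
    rw [Bool.true_or, hd2, Bool.or_true]
  | case4 cs structured p0 rest h hh =>
    rw [pvAltGo_eq_nonheader cs structured p0 rest h hh]
    have hp0 : ∃ t, pvSplitNL cs = p0 :: t := by
      by_cases hm : '\n' ∈ cs
      · have hspec := pvSplitOnMax1_of_mem cs hm
        rw [h] at hspec
        have hp0 : p0 = cs.takeWhile (· ≠ '\n') := by injection hspec with h1 _; all_goals exact h1
        have hnt : '\n' ∉ cs.takeWhile (· ≠ '\n') := by
          intro hmem
          have := List.mem_takeWhile_imp hmem
          simp at this
        refine ⟨pvSplitNL (cs.dropWhile (· ≠ '\n')).tail, ?_⟩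
        conv_lhs => rw [pvDecomp cs hm]
        rw [hp0]
        exact pvSplitNL_append _ _ hnt
      · have hspec := pvSplitOnMax1_of_not_mem cs hm
        rw [h] at hspec
        have hp0 : p0 = cs := by injection hspec with h1 _; all_goals exact h1.symm
        exact ⟨[], by rw [pvSplitNL_of_not_mem cs hm, hp0]⟩
    obtain ⟨t, ht⟩ := hp0
    rw [ht, pvDropHeaders_cons_of_neg p0 t hh, ← ht, pvJoin_pvSplitNL]
    simp

-- ===== VERDICT (by name: the statement is the Claim_ definition above) =====
theorem strip_structured_blocks_spec : Claim_equal_strip_structured_blocks := by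
  intro text _
  unfold Spec_strip_structured_blocks
  simp only [strip_structured_blocks, strip_structured_blocks_alt]
  rw [pvAltGo_spec]
  simp only [PySem.Chars.split?]
  rw [show ((['\n'] : List Char).isEmpty) = false from rfl]
  simp only [if_neg Bool.false_ne_true, Option.getD_some, pvSplitOn_eq]
  rw [pvLoop_true]
  simp
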